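-- pv_equiv track=rewrite | github.com/robertordsf09-a11y/Prometeus.1.0 | Ar.Excel/Chaveiro/Excel Unlocker Pro v2.0.py | _excel_legacy_hash
-- ===== SOURCE A (Python) =====
-- def _excel_legacy_hash(password: str) -> str:
--     """
--     Calcula o hash legado de 16-bit usado pela proteção de planilhas Excel
--     (algoritmo XOR conforme ECMA-376 Part 4, §3.3.2.3).
--     Retorna string hexadecimal maiúscula de 4 dígitos.
--     """
--     if not password:
--         return "0000"
--     chars = [ord(c) & 0xFF for c in password]
--     h = 0
--     for c in reversed(chars):
--         # rotação circular 15-bit para a esquerda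
--         h = (((h >> 14) & 0x01) | ((h << 1) & 0x7FFF)) ^ c
--     h = (((h >> 14) & 0x01) | ((h << 1) & 0x7FFF))
--     h ^= len(chars)
--     h ^= 0xCE4B
--     return format(h & 0xFFFF, "04X")
-- ===== SOURCE B (Python) =====
-- def _rotl15(v: int, k: int) -> int:
--     k %= 15
--     return ((v << k) | (v >> (15 - k))) & 0x7FFF
--
-- def _excel_legacy_hash(password: str) -> str:
--     if not password:
--         return "0000"
--     h = 0
--     for j, ch in enumerate(password):
--         h ^= _rotl15(ord(ch) & 0xFF, j + 1)
--     h ^= len(password)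
--     h ^= 0xCE4B
--     return format(h & 0xFFFF, "04X")
-- ===== Notes on version B (the rewrite author's own statement) =====
-- stated objective: alternative
-- what changed: Replaces A's backward rolling fold (state rotated then XORed with each char, reversed order) by a single forward enumerate pass that XORs each character's independent contribution rotated left within 15 bits by (index+1) mod 15, exploiting that 15-bit rotation is linear over XOR; no rolling state is carried.
import Mathlib
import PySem

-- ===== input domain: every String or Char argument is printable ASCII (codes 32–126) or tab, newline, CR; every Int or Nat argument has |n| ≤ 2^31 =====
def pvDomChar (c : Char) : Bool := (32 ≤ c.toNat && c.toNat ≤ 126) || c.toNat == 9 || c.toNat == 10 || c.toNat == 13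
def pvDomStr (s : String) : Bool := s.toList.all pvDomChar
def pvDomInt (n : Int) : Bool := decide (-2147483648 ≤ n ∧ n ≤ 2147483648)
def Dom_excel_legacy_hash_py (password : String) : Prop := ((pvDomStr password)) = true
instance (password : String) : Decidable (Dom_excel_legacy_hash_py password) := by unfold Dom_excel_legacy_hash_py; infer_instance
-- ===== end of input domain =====

-- B replaces A's backward rolling rotate-then-XOR recurrence by a single forward pass
-- XORing each character's independent contribution rotated by its position (alternative
-- decomposition exploiting linearity of rotation over XOR); same return value everywhere.

-- ===== PORT A =====
-- shared formatting helper: format(x, "04X") for 0 ≤ x ≤ 0xFFFF (exact on that range: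
-- four uppercase hex digits with leading zeros)
def pvHexDigit (n : Nat) : Char := if n < 10 then Char.ofNat (48 + n) else Char.ofNat (55 + n)
def pvHex4 (n : Nat) : String :=
  String.ofList [pvHexDigit (n / 4096 % 16), pvHexDigit (n / 256 % 16), pvHexDigit (n / 16 % 16), pvHexDigit (n % 16)]

-- A's in-loop expression (((h >> 14) & 0x01) | ((h << 1) & 0x7FFF))
def pvRotA (h : Nat) : Nat := ((h >>> 14) &&& 0x01) ||| ((h <<< 1) &&& 0x7FFF)

def excel_legacy_hash_py (password : String) : String :=
  if password.toList = [] then "0000"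
  else
    let chars := password.toList.map (fun c => c.toNat &&& 0xFF)
    let h := chars.reverse.foldl (fun h c => pvRotA h ^^^ c) 0
    let h := pvRotA h
    let h := h ^^^ chars.length
    let h := h ^^^ 0xCE4B
    pvHex4 (h &&& 0xFFFF)

-- ===== PORT B =====
-- Source B's _rotl15 helper (indices/word values are nonnegative, so Nat is exact)
def pvRotl15 (v k : Nat) : Nat :=
  ((v <<< (k % 15)) ||| (v >>> (15 - k % 15))) &&& 0x7FFF

def excel_legacy_hash_py_alt (password : String) : String :=
  if password.toList = [] then "0000"
  else
    let h := (PySem.List.enumerate password.toList 0).foldl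
      (fun h jc => h ^^^ pvRotl15 (jc.2.toNat &&& 0xFF) (jc.1.toNat + 1)) 0
    let h := h ^^^ password.toList.length
    let h := h ^^^ 0xCE4B
    pvHex4 (h &&& 0xFFFF)

-- ===== PRECONDITION & SPEC =====
def Spec_excel_legacy_hash_py (password : String) (out : String) : Prop := out = excel_legacy_hash_py_alt password
instance (password : String) (out : String) : Decidable (Spec_excel_legacy_hash_py password out) := by unfold Spec_excel_legacy_hash_py; infer_instance

-- ===== CLAIM (what is proved, stated in full; the proofs are below) =====
def Claim_equal_excel_legacy_hash_py : Prop := ∀ (password : String), Dom_excel_legacy_hash_py password → Spec_excel_legacy_hash_py password (excel_legacy_hash_py password)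

-- ===== LEMMAS AND PROOFS =====

-- sum of position-indexed contributions: H [c₀, c₁, …] j = rotl15 c₀ j ^^^ rotl15 c₁ (j+1) ^^^ …
def pvH : List Nat → Nat → Nat
  | [], _ => 0
  | c :: t, j => pvRotl15 c j ^^^ pvH t (j + 1)

theorem pv_testBit_mask15 (i : Nat) : Nat.testBit 32767 i = decide (i < 15) := by
  have h : (32767 : Nat) = 2 ^ 15 - 1 := rfl
  rw [h, Nat.testBit_two_pow_sub_one]

theorem pv_testBit_mask1 (i : Nat) : Nat.testBit 1 i = decide (i < 1) := by
  have h : (1 : Nat) = 2 ^ 1 - 1 := rfl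
  conv_lhs => rw [h]
  rw [Nat.testBit_two_pow_sub_one]

theorem pv_testBit_high {x i : Nat} (h : x < 2 ^ 15) (hi : 15 ≤ i) : x.testBit i = false := by
  apply Nat.testBit_lt_two_pow
  calc x < 2 ^ 15 := h
    _ ≤ 2 ^ i := Nat.pow_le_pow_right (by norm_num) hi

theorem pv_testBit_rotA (x i : Nat) :
    (pvRotA x).testBit i = if i = 0 then x.testBit 14 else (decide (i ≤ 14) && x.testBit (i - 1)) := by
  unfold pvRotA
  simp only [Nat.testBit_or, Nat.testBit_and, Nat.testBit_shiftLeft, Nat.testBit_shiftRight,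
    pv_testBit_mask15, pv_testBit_mask1]
  by_cases h0 : i = 0
  · subst h0; simp
  · have h1 : ¬ (i < 1) := by omega
    by_cases h2 : i ≤ 14
    · have : i < 15 := by omega
      simp [h0, h1, h2, this, Nat.one_le_iff_ne_zero.mpr h0]
    · have : ¬ (i < 15) := by omega
      simp [h0, h1, h2, this]

theorem pv_rotA_xor (a b : Nat) : pvRotA (a ^^^ b) = pvRotA a ^^^ pvRotA b := by
  apply Nat.eq_of_testBit_eq
  intro i
  simp only [Nat.testBit_xor, pv_testBit_rotA]
  by_cases h0 : i = 0 <;> simp [h0, Bool.and_xor_distrib_left]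

theorem pv_testBit_rotl15 {c : Nat} (hc : c < 2 ^ 15) (k i : Nat) :
    (pvRotl15 c k).testBit i = (decide (i < 15) && c.testBit ((i + 15 - k % 15) % 15)) := by
  unfold pvRotl15
  simp only [Nat.testBit_and, Nat.testBit_or, Nat.testBit_shiftLeft, Nat.testBit_shiftRight,
    pv_testBit_mask15]
  by_cases hi : i < 15
  · have hk : k % 15 < 15 := Nat.mod_lt _ (by norm_num)
    by_cases hki : k % 15 ≤ i
    · have e1 : (i + 15 - k % 15) % 15 = i - k % 15 := by omega
      have e2 : c.testBit (15 - k % 15 + i) = false := pv_testBit_high hc (by omega)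
      simp [hi, hki, e1, e2]
    · have e1 : (i + 15 - k % 15) % 15 = 15 - k % 15 + i := by omega
      simp [hi, hki, e1]
  · simp [hi]

theorem pv_rotA_rotl15 {c : Nat} (hc : c < 2 ^ 15) (k : Nat) :
    pvRotA (pvRotl15 c k) = pvRotl15 c (k + 1) := by
  apply Nat.eq_of_testBit_eq
  intro i
  rw [pv_testBit_rotA]
  simp only [pv_testBit_rotl15 hc]
  by_cases h0 : i = 0
  · subst h0
    have e : (14 + 15 - k % 15) % 15 = (0 + 15 - (k + 1) % 15) % 15 := by omega
    simp [e]
  · by_cases h2 : i ≤ 14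
    · have e : (i - 1 + 15 - k % 15) % 15 = (i + 15 - (k + 1) % 15) % 15 := by omega
      have hlt : i < 15 := by omega
      have hlt' : i - 1 < 15 := by omega
      simp [h0, h2, hlt, hlt', e]
    · have h15 : ¬ i < 15 := by omega
      simp [h0, h2, h15]

theorem pv_rotl15_zero {c : Nat} (hc : c < 2 ^ 15) : pvRotl15 c 0 = c := by
  apply Nat.eq_of_testBit_eq
  intro i
  rw [pv_testBit_rotl15 hc]
  by_cases hi : i < 15
  · have e : i % 15 = i := Nat.mod_eq_of_lt hi
    simp [hi, e]
  · have e2 : c.testBit i = false := pv_testBit_high hc (by omega)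
    simp [hi, e2]

theorem pv_rotA_eq_rotl15_one {c : Nat} (hc : c < 2 ^ 15) : pvRotA c = pvRotl15 c 1 := by
  have := pv_rotA_rotl15 hc 0
  rwa [pv_rotl15_zero hc] at this

-- shifting every rotation count by one
theorem pv_rotA_H (l : List Nat) (j : Nat) (hl : ∀ c ∈ l, c < 2 ^ 15) :
    pvRotA (pvH l j) = pvH l (j + 1) := by
  induction l generalizing j with
  | nil => simp [pvH]; decide
  | cons c t ih =>
    have hc : c < 2 ^ 15 := hl c (by simp)
    simp only [pvH]
    rw [pv_rotA_xor, pv_rotA_rotl15 hc, ih (j + 1) (fun x hx => hl x (by simp [hx]))]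

-- A's rolling backward fold (followed by one more rotation) equals the XOR of
-- the position-indexed contributions
theorem pv_main (l : List Nat) (hl : ∀ c ∈ l, c < 2 ^ 15) :
    pvRotA (l.reverse.foldl (fun h c => pvRotA h ^^^ c) 0) = pvH l 1 := by
  induction l with
  | nil => simp [pvH]; decide
  | cons c t ih =>
    have hc : c < 2 ^ 15 := hl c (by simp)
    have ht : ∀ x ∈ t, x < 2 ^ 15 := fun x hx => hl x (by simp [hx])
    simp only [List.reverse_cons, List.foldl_append, List.foldl_cons, List.foldl_nil]
    rw [pv_rotA_xor, ih ht, pv_rotA_H t 1 ht, pv_rotA_eq_rotl15_one hc]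
    simp only [pvH]
    exact Nat.xor_comm _ _

-- B's enumerate fold equals pvH of the masked character list
theorem pv_enum_fold (l : List Char) (s : Nat) (j : Int) (hj : 0 ≤ j) :
    (PySem.List.enumerate l j).foldl
      (fun h jc => h ^^^ pvRotl15 (jc.2.toNat &&& 0xFF) (jc.1.toNat + 1)) s
    = s ^^^ pvH (l.map (fun c => c.toNat &&& 0xFF)) (j.toNat + 1) := by
  induction l generalizing s j with
  | nil => simp [PySem.List.enumerate_nil, pvH]
  | cons c t ih =>
    rw [PySem.List.enumerate_cons]
    simp only [List.foldl_cons, List.map_cons, pvH]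
    rw [ih _ (j + 1) (by omega)]
    have e : (j + 1).toNat = j.toNat + 1 := by omega
    rw [e, Nat.xor_assoc]

-- ===== VERDICT (by name: the statement is the Claim_ definition above) =====
theorem excel_legacy_hash_py_spec : Claim_equal_excel_legacy_hash_py := by
  intro password _
  unfold Spec_excel_legacy_hash_py excel_legacy_hash_py excel_legacy_hash_py_alt
  by_cases h : password.toList = []
  · simp [h]
  · simp only [h, ite_false]
    have hmask : ∀ c ∈ password.toList.map (fun c => c.toNat &&& 0xFF), c < 2 ^ 15 := by
      intro c hc
      simp only [List.mem_map] at hc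
      obtain ⟨x, _, rfl⟩ := hc
      have : x.toNat &&& 255 ≤ 255 := Nat.and_le_right
      omega
    rw [pv_main _ hmask, pv_enum_fold password.toList 0 0 (by omega)]
    simp [List.length_map]
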